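-- pv_equiv track=rewrite | github.com/FischermanCH/A.R.I.A. | aria/core/capability_router.py | _fallback_kind_from_candidates
-- ===== SOURCE A (Python) =====
-- from typing import Iterable
--
-- def _fallback_kind_from_candidates(candidate_kinds: Iterable[str], preferred_order: Iterable[str]) -> str:
--     ordered = [str(kind).strip().lower() for kind in candidate_kinds if str(kind).strip()]
--     if not ordered:
--         return ""
--     if len(ordered) == 1:
--         return ordered[0]
--     for preferred in (str(kind).strip().lower() for kind in preferred_order if str(kind).strip()):
--         if preferred in ordered:
--             return preferred
--     return ordered[0]
-- ===== SOURCE B (Python) =====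
-- def _fallback_kind_from_candidates(candidate_kinds, preferred_order):
--     ordered = [str(k).strip().lower() for k in candidate_kinds if str(k).strip()]
--     if not ordered:
--         return ""
--     prefs = [str(k).strip().lower() for k in preferred_order if str(k).strip()]
--     rank = {}
--     for i, p in enumerate(prefs):
--         rank.setdefault(p, i)
--     absent = len(prefs)
--     return min(ordered, key=lambda k: rank.get(k, absent))
-- ===== Notes on version B (the rewrite author's own statement) =====
-- stated objective: alternative
-- what changed: A scans preferred_order testing each normalized preference for membership in the candidate list (a nested scan with early return); B builds a first-index rank dictionary over the normalized preferences once and takes a single min-by-rank pass over the candidates, relying on min's first-wins tie-breaking for the fallback.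
import Mathlib
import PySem

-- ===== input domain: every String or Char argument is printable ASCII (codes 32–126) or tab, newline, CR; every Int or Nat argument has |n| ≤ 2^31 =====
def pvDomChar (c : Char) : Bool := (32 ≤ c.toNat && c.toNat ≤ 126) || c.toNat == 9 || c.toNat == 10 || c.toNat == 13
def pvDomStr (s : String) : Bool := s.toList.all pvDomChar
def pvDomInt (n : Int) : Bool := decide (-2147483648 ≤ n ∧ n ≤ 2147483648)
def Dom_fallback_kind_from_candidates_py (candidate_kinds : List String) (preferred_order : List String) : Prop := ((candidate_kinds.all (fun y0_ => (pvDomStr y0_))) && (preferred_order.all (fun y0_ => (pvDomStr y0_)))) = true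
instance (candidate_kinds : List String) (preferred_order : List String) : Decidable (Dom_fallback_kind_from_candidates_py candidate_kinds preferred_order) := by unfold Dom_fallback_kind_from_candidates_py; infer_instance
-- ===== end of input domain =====

-- B replaces A's scan of preferred_order with repeated membership tests in the candidate list
-- by a rank dictionary built once plus a single min-by-rank pass over the candidates (objective: alternative).

-- ===== PORT A =====
-- str(kind).strip().lower()
def pvNorm (s : String) : String := PySem.Str.lower (PySem.Str.strip s)

-- [str(kind).strip().lower() for kind in ks if str(kind).strip()]  (shared: the identical comprehension occurs in both Pythons)
def pvNormList (ks : List String) : List String :=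
  (ks.filter (fun k => !(PySem.Str.strip k == ""))).map pvNorm

-- the 'for preferred in (…generator…): if preferred in ordered: return preferred' loop; none = fell through
def pvALoop (ordered : List String) : List String → Option String
  | [] => none
  | k :: rest =>
    if PySem.Str.strip k == "" then pvALoop ordered rest
    else
      let preferred := pvNorm k
      if preferred ∈ ordered then some preferred else pvALoop ordered rest

def fallback_kind_from_candidates_py (candidate_kinds : List String) (preferred_order : List String) : String :=
  let ordered := pvNormList candidate_kinds
  if ordered.isEmpty then ""
  else if ordered.length = 1 then PySem.List.pyGetD ordered 0 ""
  else
    match pvALoop ordered preferred_order with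
    | some preferred => preferred
    | none => PySem.List.pyGetD ordered 0 ""

-- ===== PORT B =====
-- for i, p in enumerate(prefs): rank.setdefault(p, i)
def pvRankLoop : Nat → List String → PySem.Dict String Nat → PySem.Dict String Nat
  | _, [], d => d
  | i, p :: rest, d => pvRankLoop (i + 1) rest (PySem.Dict.setdefault d p i)

-- key=lambda k: rank.get(k, absent)
def pvKey (rank : PySem.Dict String Nat) (absent : Nat) (k : String) : Nat :=
  rank.getD k absent

-- min(ordered, key=…): Python's min keeps the first element among equal keys
def pvMinLoop (rank : PySem.Dict String Nat) (absent : Nat) : String → List String → String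
  | best, [] => best
  | best, k :: rest =>
    if pvKey rank absent k < pvKey rank absent best then pvMinLoop rank absent k rest
    else pvMinLoop rank absent best rest

def fallback_kind_from_candidates_py_alt (candidate_kinds : List String) (preferred_order : List String) : String :=
  match pvNormList candidate_kinds with
  | [] => ""
  | b :: rest =>
    let prefs := pvNormList preferred_order
    let rank := pvRankLoop 0 prefs PySem.Dict.empty
    pvMinLoop rank prefs.length b rest

-- ===== PRECONDITION & SPEC =====
def Spec_fallback_kind_from_candidates_py (candidate_kinds : List String) (preferred_order : List String) (out : String) : Prop := out = fallback_kind_from_candidates_py_alt candidate_kinds preferred_order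
instance (candidate_kinds : List String) (preferred_order : List String) (out : String) : Decidable (Spec_fallback_kind_from_candidates_py candidate_kinds preferred_order out) := by unfold Spec_fallback_kind_from_candidates_py; infer_instance

-- ===== CLAIM (what is proved, stated in full; the proofs are below) =====
def Claim_equal_fallback_kind_from_candidates_py : Prop := ∀ (candidate_kinds : List String) (preferred_order : List String), Dom_fallback_kind_from_candidates_py candidate_kinds preferred_order → Spec_fallback_kind_from_candidates_py candidate_kinds preferred_order (fallback_kind_from_candidates_py candidate_kinds preferred_order)

-- ===== LEMMAS AND PROOFS =====

-- A's loop is find? over the normalized preferred list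
theorem pvALoop_eq_find? (ordered : List String) (prefs : List String) :
    pvALoop ordered prefs = (pvNormList prefs).find? (fun p => decide (p ∈ ordered)) := by
  induction prefs with
  | nil => rfl
  | cons k rest ih =>
    rw [pvALoop]
    by_cases h : (PySem.Str.strip k == "") = true
    · rw [if_pos h, ih]
      have : pvNormList (k :: rest) = pvNormList rest := by
        simp [pvNormList, h]
      rw [this]
    · rw [if_neg h]
      have hlist : pvNormList (k :: rest) = pvNorm k :: pvNormList rest := by
        simp [pvNormList, h]
      rw [hlist]
      by_cases hm : pvNorm k ∈ ordered
      · simp [hm, List.find?]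
      · simp [hm, List.find?, ih]

-- the rank dict built by the setdefault loop
theorem pvRankLoop_get? (qs : List String) : ∀ (i : Nat) (d : PySem.Dict String Nat) (p : String),
    (pvRankLoop i qs d).get? p =
      match d.get? p with
      | some v => some v
      | none => if p ∈ qs then some (i + qs.idxOf p) else none := by
  induction qs with
  | nil => intro i d p; cases h : d.get? p <;> simp [pvRankLoop, h]
  | cons q rest ih =>
    intro i d p
    rw [pvRankLoop, ih]
    by_cases hc : d.contains q
    · have hd : PySem.Dict.setdefault d q i = d := by simp [PySem.Dict.setdefault, hc]
      rw [hd]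
      cases h : d.get? p with
      | some v => simp
      | none =>
        have hpq : p ≠ q := by
          intro e; subst e
          rw [PySem.Dict.contains_eq_isSome_get?, h] at hc; simp at hc
        simp [List.mem_cons, hpq, Ne.symm hpq]
        by_cases hm : p ∈ rest <;> simp [hm] <;> omega
    · have hc' : d.contains q = false := by simpa using hc
      have hd : PySem.Dict.setdefault d q i = d.insert q i := by
        apply PySem.Dict.ext
        simp [PySem.Dict.setdefault, hc', PySem.Dict.items_insert_of_not_contains d i hc']
      rw [hd]
      by_cases hpq : p = q
      · subst hpq
        have : d.get? p = none := by
          rw [PySem.Dict.contains_eq_isSome_get?] at hc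
          cases h : d.get? p <;> simp [h] at hc ⊢
        simp [PySem.Dict.get?_insert_self, this]
      · rw [PySem.Dict.get?_insert_of_ne _ _ hpq]
        cases h : d.get? p with
        | some v => simp
        | none =>
          simp [List.mem_cons, hpq, Ne.symm hpq]
          by_cases hm : p ∈ rest <;> simp [hm] <;> omega

-- the min key therefore is exactly idxOf into the normalized preferred list (length when absent)
theorem pvKey_eq_idxOf (qs : List String) (p : String) :
    pvKey (pvRankLoop 0 qs PySem.Dict.empty) qs.length p = qs.idxOf p := by
  unfold pvKey
  rw [PySem.Dict.getD_eq_get?_getD, pvRankLoop_get? qs 0 PySem.Dict.empty p]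
  by_cases hm : p ∈ qs
  · simp [PySem.Dict.get?_empty, hm]
  · simp [PySem.Dict.get?_empty, hm]

theorem pvMinLoop_mem_min (rank : PySem.Dict String Nat) (absent : Nat) :
    ∀ (l : List String) (best : String),
      pvMinLoop rank absent best l ∈ best :: l ∧
      ∀ x ∈ best :: l, pvKey rank absent (pvMinLoop rank absent best l) ≤ pvKey rank absent x := by
  intro l
  induction l with
  | nil => intro best; simp [pvMinLoop]
  | cons k rest ih =>
    intro best
    by_cases h : pvKey rank absent k < pvKey rank absent best
    · obtain ⟨hmem, hmin⟩ := ih k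
      rw [pvMinLoop, if_pos h]
      refine ⟨List.mem_cons_of_mem best hmem, ?_⟩
      intro x hx
      rcases List.mem_cons.mp hx with rfl | hx
      · exact le_of_lt (lt_of_le_of_lt (hmin k (by simp)) h)
      · exact hmin x hx
    · obtain ⟨hmem, hmin⟩ := ih best
      rw [pvMinLoop, if_neg h]
      constructor
      · rcases List.mem_cons.mp hmem with e | hm
        · simp [e]
        · simp [hm]
      · intro x hx
        rcases List.mem_cons.mp hx with rfl | hx
        · exact hmin x (by simp)
        · rcases List.mem_cons.mp hx with rfl | hx
          · exact le_trans (hmin best (by simp)) (le_of_not_gt h)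
          · exact hmin x (by simp [hx])

theorem pvMinLoop_of_no_lt (rank : PySem.Dict String Nat) (absent : Nat) :
    ∀ (l : List String) (best : String),
      (∀ x ∈ l, ¬ pvKey rank absent x < pvKey rank absent best) →
      pvMinLoop rank absent best l = best := by
  intro l
  induction l with
  | nil => intro best _; rfl
  | cons k rest ih =>
    intro best h
    rw [pvMinLoop, if_neg (h k (by simp))]
    exact ih best (fun x hx => h x (by simp [hx]))

-- the central agreement: B's min-by-rank over the candidates equals A's first-preferred-hit (with first-candidate fallback)
theorem pvCentral (qs : List String) (best : String) (l : List String) :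
    pvMinLoop (pvRankLoop 0 qs PySem.Dict.empty) qs.length best l =
      (match qs.find? (fun p => decide (p ∈ best :: l)) with
       | some p => p
       | none => best) := by
  set rank := pvRankLoop 0 qs PySem.Dict.empty with hrank
  have hkey : ∀ p, pvKey rank qs.length p = qs.idxOf p := pvKey_eq_idxOf qs
  cases hf : qs.find? (fun p => decide (p ∈ best :: l)) with
  | none =>
    have hnone := List.find?_eq_none.mp hf
    have habs : ∀ x ∈ best :: l, x ∉ qs := by
      intro x hx hq
      exact absurd (by simpa using hx) (by simpa using hnone x hq)
    refine pvMinLoop_of_no_lt rank qs.length l best ?_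
    intro x hx
    rw [hkey, hkey,
      (List.idxOf_eq_length_iff).mpr (habs x (by simp [hx])),
      (List.idxOf_eq_length_iff).mpr (habs best (by simp))]
    omega
  | some p =>
    obtain ⟨hp, as, bs, hqs, has⟩ := List.find?_eq_some_iff_append.mp hf
    rw [hrank, hqs]
    clear hrank hkey hf
    subst hqs
    have hkey : ∀ x, pvKey (pvRankLoop 0 (as ++ p :: bs) PySem.Dict.empty) (as ++ p :: bs).length x = (as ++ p :: bs).idxOf x :=
      pvKey_eq_idxOf (as ++ p :: bs)
    have hpmem : p ∈ best :: l := by simpa using hp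
    have hnotas : ∀ a ∈ as, a ∉ best :: l := by
      intro a ha
      have := has a ha; simpa using this
    have hpnotas : p ∉ as := fun h => hnotas p h hpmem
    have hidxp : (as ++ p :: bs).idxOf p = as.length := by
      rw [List.idxOf_append_of_notMem hpnotas]
      simp
    have hlow : ∀ x ∈ best :: l, x ∈ as ++ p :: bs → as.length ≤ (as ++ p :: bs).idxOf x := by
      intro x hx hxq
      by_contra hlt
      push_neg at hlt
      have hxlt : (as ++ p :: bs).idxOf x < (as ++ p :: bs).length := (List.idxOf_lt_length_iff).mpr hxq
      have hget : (as ++ p :: bs)[(as ++ p :: bs).idxOf x] = x := List.getElem_idxOf hxlt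
      have hmemas : (as ++ p :: bs)[(as ++ p :: bs).idxOf x] ∈ as := by
        rw [List.getElem_append_left hlt]
        exact List.getElem_mem _
      rw [hget] at hmemas
      exact hnotas x hmemas hx
    obtain ⟨hmem, hmin⟩ := pvMinLoop_mem_min (pvRankLoop 0 (as ++ p :: bs) PySem.Dict.empty) (as ++ p :: bs).length l best
    set res := pvMinLoop (pvRankLoop 0 (as ++ p :: bs) PySem.Dict.empty) (as ++ p :: bs).length best l with hres
    have h1 : (as ++ p :: bs).idxOf res ≤ as.length := by
      have := hmin p hpmem
      rw [hkey, hkey, hidxp] at this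
      exact this
    have hreslen : (as ++ p :: bs).idxOf res < (as ++ p :: bs).length := by
      have : as.length < (as ++ p :: bs).length := by simp
      omega
    have hresq : res ∈ as ++ p :: bs := (List.idxOf_lt_length_iff).mp hreslen
    have hidxres : (as ++ p :: bs).idxOf res = as.length := le_antisymm h1 (hlow res hmem hresq)
    have hgetres : (as ++ p :: bs)[(as ++ p :: bs).idxOf res] = res := List.getElem_idxOf hreslen
    have hgetp : (as ++ p :: bs)[(as ++ p :: bs).idxOf res]'hreslen = p := by
      simp only [hidxres]
      rw [List.getElem_append_right (by omega)]
      simp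
    rw [← hgetres, hgetp]

-- ===== VERDICT (by name: the statement is the Claim_ definition above) =====
theorem fallback_kind_from_candidates_py_spec : Claim_equal_fallback_kind_from_candidates_py := by
  intro cands prefs _hdom
  unfold Spec_fallback_kind_from_candidates_py
  unfold fallback_kind_from_candidates_py fallback_kind_from_candidates_py_alt
  cases ho : pvNormList cands with
  | nil => simp
  | cons b rest =>
    simp only [List.isEmpty_cons, if_false, Bool.false_eq_true]
    by_cases hl : (b :: rest).length = 1
    · have : rest = [] := by simpa using hl
      subst this
      simp [pvMinLoop, PySem.List.pyGetD_zero_cons]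
    · rw [if_neg hl]
      rw [pvALoop_eq_find? (b :: rest) prefs]
      rw [pvCentral (pvNormList prefs) b rest]
      cases hf : (pvNormList prefs).find? (fun p => decide (p ∈ b :: rest)) with
      | none => simp [PySem.List.pyGetD_zero_cons]
      | some p => simp
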